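-- pv_equiv track=rewrite | github.com/Attyuttam/cp-practice | TLE eliminators/Div 800/one_and_two.py | solution
-- ===== SOURCE A (Python) =====
-- def solution(n,arr):
--     two_count = 0
--     for a in arr:
--         if a==2:
--             two_count+=1
--
--     if two_count==0:
--         return 1
--     if two_count==1 or two_count%2!=0:
--         return -1
--
--     req_two_num = two_count//2
--     curr_two_num = 0
--
--     for i in range(0,n):
--         if arr[i] == 2:
--             curr_two_num+=1
--         if curr_two_num == req_two_num:
--             return i+1
-- ===== SOURCE B (Python) =====
-- def solution(n, arr):
--     # Tortoise-and-hare middle finding: the main loop is the fast pointer; every time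
--     # it has passed two 2s, the slow pointer advances to its next 2.  A parity toggle
--     # replaces the total counter; no count of 2s and no second counting scan is made.
--     slow = -1      # index of the last 2 the slow pointer has consumed
--     scan = 0       # next index the slow pointer will examine
--     parity = 0     # 2s seen by the fast pointer since the slow pointer last moved
--     seen = False
--     odd = False
--     for a in arr:
--         if a == 2:
--             seen = True
--             odd = not odd
--             parity += 1
--             if parity == 2:
--                 parity = 0
--                 while arr[scan] != 2:
--                     scan += 1
--                 slow = scan
--                 scan += 1
--     if not seen:
--         return 1
--     if odd:
--         return -1
--     return slow + 1
-- ===== Notes on version B (the rewrite author's own statement) =====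
-- stated objective: alternative
-- what changed: B replaces A's count-then-rescan scheme by tortoise-and-hare middle finding: one interleaved pass in which a slow pointer advances to its next 2 each time the main (fast) loop has passed two 2s, with a parity toggle instead of a total counter; Pre_ excludes inputs on which A's second loop falls through and Python returns None instead of an int.
-- outside the precondition, e.g. on solution(0, [2, 2]): A returns None, B returns 1; on solution(1, [1, 2, 2, 2, 2]): A returns None, B returns 3
import Mathlib
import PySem

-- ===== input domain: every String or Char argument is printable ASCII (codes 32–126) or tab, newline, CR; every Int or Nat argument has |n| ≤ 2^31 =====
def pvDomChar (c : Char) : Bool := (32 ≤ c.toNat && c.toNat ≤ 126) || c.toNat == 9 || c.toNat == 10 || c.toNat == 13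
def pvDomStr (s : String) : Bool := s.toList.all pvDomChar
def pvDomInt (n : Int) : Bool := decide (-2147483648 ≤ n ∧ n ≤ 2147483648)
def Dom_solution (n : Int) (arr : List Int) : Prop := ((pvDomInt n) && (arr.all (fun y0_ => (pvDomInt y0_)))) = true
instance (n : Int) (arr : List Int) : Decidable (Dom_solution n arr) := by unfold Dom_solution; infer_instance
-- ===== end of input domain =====

-- B replaces A's count-then-rescan scheme by tortoise-and-hare middle finding: one interleaved
-- pass where a slow pointer advances to its next 2 each time the fast loop has passed two 2s
-- (parity toggle instead of a total counter); objective: alternative, same O(n) cost.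


-- ===== PORT A =====
-- second loop of A: 'for i in range(0, n): …' with early return; none = the loop falls
-- through and Python returns None (excluded by Pre_solution)
def solutionLoopA (arr : List Int) (req : Int) : List Int → Int → Option Int
  | [], _ => none
  | i :: is, curr =>
    match PySem.List.pyGet? arr i with
    | none => none   -- IndexError (unreachable under Pre_solution)
    | some a =>
      let curr' := if a = 2 then curr + 1 else curr
      if curr' = req then some (i + 1) else solutionLoopA arr req is curr'

def solution (n : Int) (arr : List Int) : Int :=
  let two_count : Int := arr.foldl (fun acc a => if a == 2 then acc + 1 else acc) 0
  if two_count = 0 then 1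
  else if two_count = 1 ∨ PySem.Int.mod two_count 2 ≠ 0 then -1
  else
    let req := PySem.Int.floordiv two_count 2
    -- Python returns None when the loop falls through; 0 stands for that (outside Pre_solution)
    (solutionLoopA arr req (PySem.List.pyRange 0 n 1) 0).getD 0

-- ===== PORT B =====
-- B's inner 'while arr[scan] != 2: scan += 1', walking over the not-yet-examined suffix
-- arr.drop scan; the [] branch is where Python's arr[scan] would raise IndexError
-- (unreachable whenever B enters the while loop)
def solutionScan : List Int → Nat → Nat
  | [], scan => scan
  | a :: t, scan => if a = 2 then scan else solutionScan t (scan + 1)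

-- one iteration of B's 'for a in arr' loop; state = (slow, scan, parity, seen, odd)
def solutionStep (arr : List Int) (st : Int × Nat × Nat × Bool × Bool) (a : Int) :
    Int × Nat × Nat × Bool × Bool :=
  match st with
  | (slow, scan, parity, seen, odd) =>
    if a = 2 then
      let parity' := parity + 1
      if parity' = 2 then
        let j := solutionScan (arr.drop scan) scan
        ((j : Int), j + 1, 0, true, !odd)
      else (slow, scan, parity', true, !odd)
    else (slow, scan, parity, seen, odd)

def solution_alt (_n : Int) (arr : List Int) : Int :=
  match arr.foldl (solutionStep arr) (-1, 0, 0, false, false) with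
  | (slow, _, _, seen, odd) =>
    if !seen then 1 else if odd then -1 else slow + 1

-- ===== PRECONDITION & SPEC =====
-- Pre_ excludes exactly the inputs on which A's second loop falls through and Python returns
-- None (not an int): the count of 2s is even and ≥ 2 but the (count/2)-th 2 does not occur
-- among the first n elements.
def Pre_solution (n : Int) (arr : List Int) : Prop :=
  arr.count 2 = 0 ∨ arr.count 2 % 2 = 1 ∨ arr.count 2 / 2 ≤ (arr.take n.toNat).count 2
instance (n : Int) (arr : List Int) : Decidable (Pre_solution n arr) := by unfold Pre_solution; infer_instance

def pvWitness_solution : Int × List Int := (4, [2, 1, 2, 1])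

def Spec_solution (n : Int) (arr : List Int) (out : Int) : Prop := out = solution_alt n arr
instance (n : Int) (arr : List Int) (out : Int) : Decidable (Spec_solution n arr out) := by unfold Spec_solution; infer_instance

-- ===== CLAIM (what is proved, stated in full; the proofs are below) =====
def Claim_equal_solution : Prop := ∀ (n : Int) (arr : List Int), Dom_solution n arr → Pre_solution n arr → Spec_solution n arr (solution n arr)

-- ===== LEMMAS AND PROOFS =====

-- positions of the 2s of arr, in order (proof-side characterisation shared by both ports)
def solutionPos (arr : List Int) : List Int :=
  (PySem.List.enumerate arr 0).filterMap (fun p => if p.2 = 2 then some p.1 else none)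

-- j is the (k+1)-th 2 of arr (0-indexed k)
def IsNthTwo (arr : List Int) (k j : Nat) : Prop :=
  arr[j]? = some 2 ∧ (arr.take j).count 2 = k

theorem pos_get (arr : List Int) (s : Int) (j r : Nat) (hj : j < arr.length)
    (h2 : arr[j] = 2) (hc : (arr.take j).count 2 = r) :
    ((PySem.List.enumerate arr s).filterMap (fun p => if p.2 = 2 then some p.1 else none))[r]?
      = some (s + j) := by
  induction arr generalizing s j r with
  | nil => simp at hj
  | cons a t ih =>
    rw [PySem.List.enumerate_cons]
    cases j with
    | zero =>
      have ha : a = 2 := by simpa using h2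
      have hr : r = 0 := by simpa using hc.symm
      subst hr
      rw [List.filterMap_cons_some (b := s) (by simp [ha])]
      simp
    | succ j' =>
      have hj' : j' < t.length := by simpa using hj
      have h2' : t[j'] = 2 := by simpa using h2
      have hc' : (List.count 2 (t.take j') + if a = 2 then 1 else 0) = r := by
        simpa [List.count_cons] using hc
      by_cases h : a = 2
      · obtain ⟨r', rfl⟩ : ∃ r', r = r' + 1 :=
          ⟨List.count 2 (t.take j'), by simp [h] at hc'; omega⟩
        rw [List.filterMap_cons_some (b := s) (by simp [h]), List.getElem?_cons_succ,
          ih (s + 1) j' r' hj' h2' (by simp [h] at hc'; omega)]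
        congr 1; push_cast; ring
      · rw [List.filterMap_cons_none (by simp [h]),
          ih (s + 1) j' r hj' h2' (by simp [h] at hc'; omega)]
        congr 1; push_cast; ring

theorem count_take_succ (arr : List Int) (j : Nat) (hj : j < arr.length) :
    (arr.take (j + 1)).count 2 = (arr.take j).count 2 + (if arr[j] = 2 then 1 else 0) := by
  rw [← List.take_concat_get hj, List.concat_eq_append, List.count_append]
  by_cases h : arr[j] = 2 <;> simp [h]

theorem nth_unique (arr : List Int) (k j1 j2 : Nat)
    (h1 : IsNthTwo arr k j1) (h2 : IsNthTwo arr k j2) : j1 = j2 := by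
  obtain ⟨hg1, hc1⟩ := h1
  obtain ⟨hg2, hc2⟩ := h2
  obtain ⟨hl1, he1⟩ := List.getElem?_eq_some_iff.mp hg1
  obtain ⟨hl2, he2⟩ := List.getElem?_eq_some_iff.mp hg2
  by_contra hne
  rcases Nat.lt_or_ge j1 j2 with h | h
  · have hs : arr.take (j1 + 1) = (arr.take j2).take (j1 + 1) := by
      rw [List.take_take]; congr 1; omega
    have hle : (arr.take (j1 + 1)).count 2 ≤ (arr.take j2).count 2 := by
      rw [hs]; exact (List.take_sublist _ _).count_le 2
    rw [count_take_succ arr j1 hl1, hc1, he1, hc2] at hle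
    simp at hle
  · have hlt : j2 < j1 := by omega
    have hs : arr.take (j2 + 1) = (arr.take j1).take (j2 + 1) := by
      rw [List.take_take]; congr 1; omega
    have hle : (arr.take (j2 + 1)).count 2 ≤ (arr.take j1).count 2 := by
      rw [hs]; exact (List.take_sublist _ _).count_le 2
    rw [count_take_succ arr j2 hl2, hc2, he2, hc1] at hle
    simp at hle

theorem exists_nth (arr : List Int) (k : Nat) (h : k < arr.count 2) :
    ∃ j, IsNthTwo arr k j := by
  induction arr generalizing k with
  | nil => simp at h
  | cons a t ih =>
    by_cases ha : a = 2
    · cases k with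
      | zero => exact ⟨0, by simp [IsNthTwo, ha]⟩
      | succ k' =>
        have h' : k' < t.count 2 := by
          rw [List.count_cons, if_pos (by simp [ha])] at h; omega
        obtain ⟨j, hg, hc⟩ := ih k' h'
        exact ⟨j + 1, by simpa using hg, by simpa [List.count_cons, ha] using hc⟩
    · have h' : k < t.count 2 := by
        rw [List.count_cons, if_neg (by simp [ha])] at h; omega
      obtain ⟨j, hg, hc⟩ := ih k h'
      exact ⟨j + 1, by simpa using hg, by simpa [List.count_cons, ha] using hc⟩

-- B's while loop finds exactly the (k+1)-th 2 when scan has already passed the first k 2s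
theorem scan_eq (arr : List Int) (k : Nat) :
    ∀ (d scan j : Nat), j - scan = d → (arr.take scan).count 2 = k → IsNthTwo arr k j →
    solutionScan (arr.drop scan) scan = j := by
  intro d
  induction d with
  | zero =>
    intro scan j hd hcs hnth
    have hle : scan ≤ j := by
      by_contra hgt
      have hlt : j < scan := by omega
      obtain ⟨hl, he⟩ := List.getElem?_eq_some_iff.mp hnth.1
      have hs : arr.take (j + 1) = (arr.take scan).take (j + 1) := by
        rw [List.take_take]; congr 1; omega
      have hle2 : (arr.take (j + 1)).count 2 ≤ (arr.take scan).count 2 := by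
        rw [hs]; exact (List.take_sublist _ _).count_le 2
      rw [count_take_succ arr j hl, hnth.2, he, hcs] at hle2
      simp at hle2
    have hje : scan = j := by omega
    subst hje
    obtain ⟨hl, he⟩ := List.getElem?_eq_some_iff.mp hnth.1
    rw [List.drop_eq_getElem_cons hl]
    simp [solutionScan, he]
  | succ d ih =>
    intro scan j hd hcs hnth
    have hlt : scan < j := by omega
    obtain ⟨hl, _⟩ := List.getElem?_eq_some_iff.mp hnth.1
    have hsl : scan < arr.length := by omega
    rw [List.drop_eq_getElem_cons hsl]
    simp only [solutionScan]
    by_cases ha : arr[scan] = 2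
    · exfalso
      have : IsNthTwo arr k scan := ⟨by rw [List.getElem?_eq_getElem hsl, ha], hcs⟩
      have := nth_unique arr k scan j this hnth
      omega
    · rw [if_neg ha]
      exact ih (scan + 1) j (by omega)
        (by rw [count_take_succ arr scan hsl, hcs, if_neg ha]; omega) hnth


-- the loop invariant of B's fold: c 2s processed so far
def solutionInv (arr : List Int) (c : Nat) (st : Int × Nat × Nat × Bool × Bool) : Prop :=
  st.2.2.1 = c % 2 ∧ st.2.2.2.1 = decide (c ≠ 0) ∧ st.2.2.2.2 = decide (c % 2 = 1) ∧
  (arr.take st.2.1).count 2 = c / 2 ∧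
  (c / 2 ≠ 0 → ∃ j, IsNthTwo arr (c / 2 - 1) j ∧ st.1 = (j : Nat))

theorem fold_inv (arr : List Int) :
    ∀ (s p : List Int) (st : Int × Nat × Nat × Bool × Bool), arr = p ++ s →
    solutionInv arr (p.count 2) st →
    solutionInv arr (arr.count 2) (s.foldl (solutionStep arr) st) := by
  intro s
  induction s with
  | nil =>
    intro p st harr hinv
    simpa [harr] using hinv
  | cons a s' ih =>
    intro p st harr hinv
    rw [List.foldl_cons]
    have harr' : arr = (p ++ [a]) ++ s' := by simp [harr]
    apply ih (p ++ [a]) _ harr'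
    obtain ⟨slow, scan, parity, seen, odd⟩ := st
    obtain ⟨hp, hs, ho, hc, hj⟩ := hinv
    simp only at hp hs ho hc hj
    set c := p.count 2 with hcdef
    by_cases ha : a = 2
    · have hc' : (p ++ [a]).count 2 = c + 1 := by simp [ha, hcdef]
      rw [hc']
      simp only [solutionStep, if_pos ha]
      by_cases hpar : parity + 1 = 2
      · -- c is odd: c = 2k+1; slow advances to the (k+1)-th 2
        have hcodd : c % 2 = 1 := by omega
        rw [if_pos hpar]
        have hklt : c / 2 < arr.count 2 := by
          have : (p ++ [a]).count 2 ≤ arr.count 2 := by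
            rw [harr']; simpa using (List.sublist_append_left (p ++ [a]) s').count_le 2
          omega
        obtain ⟨j, hnth⟩ := exists_nth arr (c / 2) hklt
        have hscan : solutionScan (arr.drop scan) scan = j :=
          scan_eq arr (c / 2) (j - scan) scan j rfl hc hnth
        obtain ⟨hl, he⟩ := List.getElem?_eq_some_iff.mp hnth.1
        refine ⟨by simp only []; omega, by simp, ?_, ?_, ?_⟩
        · simp only []
          rw [ho]
          have h1 : (c + 1) % 2 = 0 := by omega
          simp [hcodd, h1]
        · simp only [hscan]
          rw [count_take_succ arr j hl, hnth.2, if_pos he]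
          omega
        · intro _
          refine ⟨j, ?_, by simp [hscan]⟩
          have : (c + 1) / 2 - 1 = c / 2 := by omega
          rw [this]; exact hnth
      · -- c even: only parity/odd flip
        have hcev : c % 2 = 0 := by omega
        rw [if_neg hpar]
        refine ⟨by simp only []; omega, by simp, ?_, ?_, ?_⟩
        · simp only []
          rw [ho]
          have h1 : (c + 1) % 2 = 1 := by omega
          simp [hcev, h1]
        · simp only []
          omega
        · intro hne
          have : (c + 1) / 2 = c / 2 := by omega
          rw [this] at hne ⊢
          exact hj hne
    · have hc' : (p ++ [a]).count 2 = c := by simp [ha, hcdef]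
      rw [hc']
      simp only [solutionStep, if_neg ha]
      exact ⟨hp, hs, ho, hc, hj⟩

theorem loop_main (arr : List Int) (req : Int) :
    ∀ (k j : Nat) (n curr : Int),
    (j : Int) + k = n →
    curr = ((arr.take j).count 2 : Int) →
    curr < req →
    req ≤ ((arr.take n.toNat).count 2 : Int) →
    solutionLoopA arr req (PySem.List.pyRange j n 1) curr
      = some (PySem.List.pyGetD (solutionPos arr) (req - 1) 0 + 1) := by
  intro k
  induction k with
  | zero =>
    intro j n curr hn hcur hlt hreq
    have hn' : n = (j : Int) := by omega
    subst hn'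
    simp at hreq
    omega
  | succ k ih =>
    intro j n curr hn hcur hlt hreq
    have hjn : (j : Int) < n := by omega
    rw [PySem.List.pyRange_one_cons hjn]
    have hjlen : j < arr.length := by
      by_contra hge
      have h1 : arr.take j = arr := List.take_of_length_le (by omega)
      have h2 : ((arr.take n.toNat).count 2 : Int) ≤ ((arr.count 2 : Nat) : Int) := by
        exact_mod_cast (arr.take_sublist n.toNat).count_le 2
      rw [h1] at hcur
      omega
    unfold solutionLoopA
    rw [PySem.List.pyGet?_natCast, List.getElem?_eq_getElem hjlen]
    simp only
    by_cases ha : arr[j] = 2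
    · have hcur' : curr + 1 = ((arr.take (j + 1)).count 2 : Int) := by
        rw [count_take_succ arr j hjlen]; simp [ha]; omega
      by_cases hhit : curr + 1 = req
      · have hr : (arr.take j).count 2 = (req - 1).toNat := by omega
        have hget := pos_get arr 0 j (req - 1).toNat hjlen ha hr
        simp only [if_pos ha, if_pos hhit]
        unfold solutionPos
        have hcast : req - 1 = (((req - 1).toNat : Nat) : Int) := by omega
        rw [hcast, PySem.List.pyGetD_natCast]
        unfold solutionPos at hget
        rw [List.getD_eq_getElem?_getD, hget]
        simp
      · simp only [if_pos ha, if_neg hhit]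
        exact ih (j + 1) n (curr + 1) (by push_cast; omega) hcur' (by omega) hreq
    · have hcur' : curr = ((arr.take (j + 1)).count 2 : Int) := by
        rw [count_take_succ arr j hjlen]; simp [ha]; omega
      have hne : curr ≠ req := by omega
      simp only [if_neg ha, if_neg hne]
      exact ih (j + 1) n curr (by push_cast; omega) hcur' hlt hreq

theorem fold_count (arr : List Int) :
    arr.foldl (fun acc a => if a == 2 then acc + 1 else acc) (0 : Int) = (arr.count 2 : Int) := by
  simpa using PySem.List.foldl_beq_add_one arr (2 : Int) 0

-- ===== VERDICT (by name: the statement is the Claim_ definition above) =====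
theorem solution_spec : Claim_equal_solution := by
  intro n arr _ hpre
  unfold Spec_solution solution solution_alt
  simp only [fold_count]
  have hinv := fold_inv arr arr [] (-1, 0, 0, false, false) rfl
    (by refine ⟨rfl, rfl, rfl, by simp, by simp⟩)
  rcases hst : arr.foldl (solutionStep arr) (-1, 0, 0, false, false) with
    ⟨slow, scan, parity, seen, odd⟩
  rw [hst] at hinv
  obtain ⟨hp, hs, ho, hc, hj⟩ := hinv
  simp only at hp hs ho hc hj
  set c := arr.count 2 with hcdef
  have key_mod : ∀ m : Nat, PySem.Int.mod (m : Int) 2 = ((m % 2 : Nat) : Int) := by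
    intro m
    rw [show ((2 : Int) = ((2 : Nat) : Int)) from rfl, PySem.Int.mod_natCast]
  have key_div : ∀ m : Nat, PySem.Int.floordiv (m : Int) 2 = ((m / 2 : Nat) : Int) := by
    intro m
    rw [show ((2 : Int) = ((2 : Nat) : Int)) from rfl, PySem.Int.floordiv_natCast]
  by_cases h0 : c = 0
  · have : seen = false := by rw [hs, h0]; simp
    simp [h0, this]
  · have hne : ((c : Nat) : Int) ≠ 0 := by exact_mod_cast h0
    have hseen : seen = true := by rw [hs]; simp [h0]
    by_cases hodd : c % 2 = 1
    · have hmodne : PySem.Int.mod ((c : Nat) : Int) 2 ≠ 0 := by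
        rw [key_mod c, hodd]; simp
      have hoddb : odd = true := by rw [ho]; simp [hodd]
      rw [if_neg hne, if_pos (Or.inr hmodne)]
      simp [hseen, hoddb]
    · have heven : c % 2 = 0 := by omega
      have hmod : PySem.Int.mod ((c : Nat) : Int) 2 = 0 := by
        rw [key_mod c, heven]; simp
      have hone : ((c : Nat) : Int) ≠ 1 := by
        have h1 : c ≠ 1 := by omega
        exact_mod_cast h1
      have hA : ¬(((c : Nat) : Int) = 1 ∨ PySem.Int.mod ((c : Nat) : Int) 2 ≠ 0) := by
        rintro (h | h)
        · exact hone h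
        · exact h hmod
      have hoddb : odd = false := by rw [ho]; simp [hodd]
      have hpre' : c / 2 ≤ (arr.take n.toNat).count 2 := by
        rcases hpre with h | h | h
        · exact absurd h h0
        · exact absurd h hodd
        · exact h
      have hk0 : c / 2 ≠ 0 := by omega
      obtain ⟨j, hnth, hslow⟩ := hj hk0
      obtain ⟨hl, he⟩ := List.getElem?_eq_some_iff.mp hnth.1
      have hloop := loop_main arr (PySem.Int.floordiv ((c : Nat) : Int) 2)
        n.toNat 0 n 0
        (by
          have hn0 : 0 ≤ n := by
            by_contra hneg
            have ht : n.toNat = 0 := by omega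
            rw [ht] at hpre'
            simp at hpre'
            omega
          omega)
        (by simp)
        (by rw [key_div c]
            have hp2 : 0 < c / 2 := by omega
            exact_mod_cast hp2)
        (by rw [key_div c]; exact_mod_cast hpre')
      rw [if_neg hne, if_neg hA]
      simp only [Nat.cast_zero] at hloop
      rw [hloop]
      have hget := pos_get arr 0 j (c / 2 - 1) hl he hnth.2
      have hcast : PySem.Int.floordiv ((c : Nat) : Int) 2 - 1 = (((c / 2 - 1 : Nat) : Nat) : Int) := by
        rw [key_div c]; omega
      rw [hcast, PySem.List.pyGetD_natCast]
      unfold solutionPos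
      rw [List.getD_eq_getElem?_getD, hget]
      simp [hseen, hoddb, hslow]
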